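-- pv_equiv track=rewrite | github.com/weidewind/covid | mutation_caller.py | call_mutations
-- ===== SOURCE A (Python) =====
-- def call_mutations(seq, refseq, ref_num):
-- 	mut_list = []
-- 	ins_open = -1
-- 	del_open = -1
-- 	for ind, letter in enumerate(list(seq)):
-- 		ref_letter = refseq[ind]
-- 		ref_ind = ref_num[ind]
-- 		if (letter != ref_letter):
-- 			if (letter == "-" and del_open == -1):
-- 				del_open = ind
-- 			if (ref_letter == "-" and ins_open == -1):
-- 				ins_open = ind
-- 			if (letter not in ["-", "n", "N"] and ref_letter != "-"):  # todo: process all ambigious letters correctly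
-- 				mut_list.append(ref_letter + str(ref_num[ind]) + letter)
-- 		if (del_open != -1 and letter != "-"):
-- 			mut_list.append(del_tostring(ref_num[del_open], ref_num[ind], str(refseq[del_open:ind])))
-- 			del_open = -1
-- 		if (ins_open != -1 and ref_letter != "-"):
-- 			mut_list.append(ins_tostring(ref_num[ins_open], str(seq[ins_open:ind])))
-- 			ins_open = -1
-- 	return(mut_list)
--
-- def del_tostring(del_open, del_close, delseq):
-- 	string = "del" + str(del_open)
-- 	if (del_close - 1 > del_open):
-- 		string += "_" + str(del_close - 1)
-- 	trimmed_seq = delseq.replace("-", "")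
-- 	string += trimmed_seq
-- 	return(string)
--
-- def ins_tostring(ins_open, insseq):
-- 	string = "ins" + str(ins_open)
-- 	trimmed_seq = insseq.replace("-", "")
-- 	string += trimmed_seq
-- 	return(string)
-- ===== SOURCE B (Python) =====
-- def call_mutations(seq, refseq, ref_num):
-- 	n = len(seq)
-- 	# pass 1a: deletion segments (maximal '-' runs in seq), keyed by closing index
-- 	dels = {}
-- 	i = 0
-- 	while i < n:
-- 		if seq[i] == "-" and refseq[i] != "-":
-- 			j = i
-- 			while j < n and seq[j] == "-":
-- 				j += 1
-- 			if j < n: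
-- 				dels[j] = del_tostring(ref_num[i], ref_num[j], str(refseq[i:j]))
-- 			i = j + 1
-- 		else:
-- 			i += 1
-- 	# pass 1b: insertion segments (maximal '-' runs in refseq), keyed by closing index
-- 	inss = {}
-- 	i = 0
-- 	while i < n:
-- 		if refseq[i] == "-" and seq[i] != "-":
-- 			j = i
-- 			while j < n and refseq[j] == "-":
-- 				j += 1
-- 			if j < n:
-- 				inss[j] = ins_tostring(ref_num[i], str(seq[i:j]))
-- 			i = j + 1
-- 		else:
-- 			i += 1
-- 	# pass 2: emit events in position order (substitution, then del-close, then ins-close)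
-- 	mut_list = []
-- 	for i in range(n):
-- 		if seq[i] != refseq[i] and seq[i] not in "-nN" and refseq[i] != "-":
-- 			mut_list.append(refseq[i] + str(ref_num[i]) + seq[i])
-- 		if i in dels:
-- 			mut_list.append(dels[i])
-- 		if i in inss:
-- 			mut_list.append(inss[i])
-- 	return mut_list
--
-- def del_tostring(del_open, del_close, delseq):
-- 	string = "del" + str(del_open)
-- 	if (del_close - 1 > del_open):
-- 		string += "_" + str(del_close - 1)
-- 	trimmed_seq = delseq.replace("-", "")
-- 	string += trimmed_seq
-- 	return(string)
--
-- def ins_tostring(ins_open, insseq):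
-- 	string = "ins" + str(ins_open)
-- 	trimmed_seq = insseq.replace("-", "")
-- 	string += trimmed_seq
-- 	return(string)
-- ===== Notes on version B (the rewrite author's own statement) =====
-- stated objective: alternative
-- what changed: A interleaves substitution calls and gap tracking in one stateful pass with del_open/ins_open sentinels; B first collects deletion and insertion gap segments in two independent run-scans keyed by closing index, then emits all events in a single stateless pass over the positions.
import Mathlib
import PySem

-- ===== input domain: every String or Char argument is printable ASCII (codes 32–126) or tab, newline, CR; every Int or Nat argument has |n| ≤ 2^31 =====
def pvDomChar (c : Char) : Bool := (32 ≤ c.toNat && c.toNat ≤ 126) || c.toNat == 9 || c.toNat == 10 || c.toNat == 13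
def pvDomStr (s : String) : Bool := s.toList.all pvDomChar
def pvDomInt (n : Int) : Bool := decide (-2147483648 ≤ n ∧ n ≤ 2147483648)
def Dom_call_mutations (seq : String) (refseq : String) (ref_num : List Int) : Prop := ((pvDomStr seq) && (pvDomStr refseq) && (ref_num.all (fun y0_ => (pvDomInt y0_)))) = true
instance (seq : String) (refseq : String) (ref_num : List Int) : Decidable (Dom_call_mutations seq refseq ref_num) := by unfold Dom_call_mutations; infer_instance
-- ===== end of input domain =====

-- B re-derives the same mutation calls by collecting deletion/insertion gap segments in
-- separate scans (a dict keyed by closing index) and then emitting all events in one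
-- stateless pass; no speed claim (objective: alternative decomposition).

-- ===== PORT A =====
-- shared string builders (identical helper code in Source A and Source B)
def del_tostring (del_open : Int) (del_close : Int) (delseq : List Char) : List Char :=
  let s := ['d','e','l'] ++ PySem.Int.toChars del_open
  let s := if del_open < del_close - 1 then s ++ ['_'] ++ PySem.Int.toChars (del_close - 1) else s
  s ++ PySem.Chars.replace delseq ['-'] []

def ins_tostring (ins_open : Int) (insseq : List Char) : List Char :=
  ['i','n','s'] ++ PySem.Int.toChars ins_open ++ PySem.Chars.replace insseq ['-'] []

-- the body of A's 'for ind, letter in enumerate(list(seq))' loop; state = (mut_list, ins_open, del_open)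
def pvStepA (s r : List Char) (nums : List Int) (st : List String × Int × Int) (p : Int × Char) : List String × Int × Int :=
  let ind := p.1
  let letter := p.2
  let ref_letter := PySem.List.pyGetD r ind ' '
  let _ref_ind := PySem.List.pyGetD nums ind 0   -- A binds ref_ind (unused; in range under Pre_)
  let del_open := if letter ≠ ref_letter ∧ letter = '-' ∧ st.2.2 = -1 then ind else st.2.2
  let ins_open := if letter ≠ ref_letter ∧ ref_letter = '-' ∧ st.2.1 = -1 then ind else st.2.1
  let mut_list := if letter ≠ ref_letter ∧ ¬(letter = '-' ∨ letter = 'n' ∨ letter = 'N') ∧ ref_letter ≠ '-'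
    then st.1 ++ [String.ofList (ref_letter :: (PySem.Int.toChars (PySem.List.pyGetD nums ind 0) ++ [letter]))]
    else st.1
  let p1 : List String × Int :=
    if del_open ≠ -1 ∧ letter ≠ '-' then
      (mut_list ++ [String.ofList (del_tostring (PySem.List.pyGetD nums del_open 0) (PySem.List.pyGetD nums ind 0)
                      (PySem.List.slice r (some del_open) (some ind)))], -1)
    else (mut_list, del_open)
  let p2 : List String × Int :=
    if ins_open ≠ -1 ∧ ref_letter ≠ '-' then
      (p1.1 ++ [String.ofList (ins_tostring (PySem.List.pyGetD nums ins_open 0)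
                  (PySem.List.slice s (some ins_open) (some ind)))], -1)
    else (p1.1, ins_open)
  (p2.1, p2.2, p1.2)

def call_mutations (seq : String) (refseq : String) (ref_num : List Int) : List String :=
  ((PySem.List.enumerate seq.toList).foldl (pvStepA seq.toList refseq.toList ref_num) ([], -1, -1)).1

-- ===== PORT B =====
-- inner 'while j < n and run[j] == "-": j += 1' (fuel only makes the recursion structural)
def pvRunEnd (n : Nat) (a : List Char) : Nat → Nat → Nat
  | 0, j => j
  | fuel+1, j => if j < n ∧ PySem.List.pyGetD a (j : Int) ' ' = '-' then pvRunEnd n a fuel (j+1) else j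

-- Source B's _segments: maximal '-'-runs of a (opened only where b has no gap), keyed by closing index
def pvSegments (n : Nat) (a b : List Char) (build : Nat → Nat → List Char) :
    Nat → Nat → PySem.Dict Int (List Char) → PySem.Dict Int (List Char)
  | 0, _, segs => segs
  | fuel+1, i, segs =>
    if i < n then
      if PySem.List.pyGetD a (i : Int) ' ' = '-' ∧ PySem.List.pyGetD b (i : Int) ' ' ≠ '-' then
        let j := pvRunEnd n a (n+1) i
        let segs := if j < n then segs.insert (j : Int) (build i j) else segs
        pvSegments n a b build fuel (j+1) segs
      else pvSegments n a b build fuel (i+1) segs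
    else segs

def call_mutations_alt (seq : String) (refseq : String) (ref_num : List Int) : List String :=
  let s := seq.toList
  let r := refseq.toList
  let n := s.length
  let dels := pvSegments n s r (fun i j =>
    del_tostring (PySem.List.pyGetD ref_num (i : Int) 0) (PySem.List.pyGetD ref_num (j : Int) 0)
      (PySem.List.slice r (some (i : Int)) (some (j : Int)))) (n+1) 0 PySem.Dict.empty
  let inss := pvSegments n r s (fun i j =>
    ins_tostring (PySem.List.pyGetD ref_num (i : Int) 0)
      (PySem.List.slice s (some (i : Int)) (some (j : Int)))) (n+1) 0 PySem.Dict.empty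
  (List.range n).foldl (fun (mut_list : List String) (i : Nat) =>
    let letter := PySem.List.pyGetD s (i : Int) ' '
    let ref_letter := PySem.List.pyGetD r (i : Int) ' '
    let mut_list := if letter ≠ ref_letter ∧ ¬(letter = '-' ∨ letter = 'n' ∨ letter = 'N') ∧ ref_letter ≠ '-'
      then mut_list ++ [String.ofList (ref_letter :: (PySem.Int.toChars (PySem.List.pyGetD ref_num (i : Int) 0) ++ [letter]))]
      else mut_list
    let mut_list := match dels.get? (i : Int) with
      | some v => mut_list ++ [String.ofList v]
      | none => mut_list
    match inss.get? (i : Int) with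
      | some v => mut_list ++ [String.ofList v]
      | none => mut_list) []

-- ===== PRECONDITION & SPEC =====
-- A indexes refseq[ind] and ref_num[ind] for every position of seq: shorter refseq/ref_num raise IndexError.
def Pre_call_mutations (seq : String) (refseq : String) (ref_num : List Int) : Prop :=
  seq.toList.length ≤ refseq.toList.length ∧ seq.toList.length ≤ ref_num.length
instance (seq : String) (refseq : String) (ref_num : List Int) : Decidable (Pre_call_mutations seq refseq ref_num) := by
  unfold Pre_call_mutations; infer_instance
def pvWitness_call_mutations : String × String × List Int := ("ac-t", "aagt", [1, 2, 3, 4])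

def Spec_call_mutations (seq : String) (refseq : String) (ref_num : List Int) (out : List String) : Prop := out = call_mutations_alt seq refseq ref_num
instance (seq : String) (refseq : String) (ref_num : List Int) (out : List String) : Decidable (Spec_call_mutations seq refseq ref_num out) := by unfold Spec_call_mutations; infer_instance

-- ===== CLAIM (what is proved, stated in full; the proofs are below) =====
def Claim_equal_call_mutations : Prop := ∀ (seq : String) (refseq : String) (ref_num : List Int), Dom_call_mutations seq refseq ref_num → Pre_call_mutations seq refseq ref_num → Spec_call_mutations seq refseq ref_num (call_mutations seq refseq ref_num)

-- ===== LEMMAS AND PROOFS =====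

-- the open-gap state of A's loop before processing index i ('-1' encoded as none):
-- pvOpen s r = del_open (gap run in s), pvOpen r s = ins_open (gap run in r)
def pvOpen (a b : List Char) : Nat → Option Nat
  | 0 => none
  | i+1 =>
    if a.getD i ' ' = '-' then
      (if b.getD i ' ' ≠ '-' ∧ pvOpen a b i = none then some i else pvOpen a b i)
    else none

def pvEnc : Option Nat → Int
  | none => -1
  | some o => (o : Int)

-- what a gap-segment scan over a (with partner b) reports at closing index q
def pvSegSpec (a b : List Char) (build : Nat → Nat → List Char) (q : Nat) : Option (List Char) :=
  match pvOpen a b q with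
  | some o => if a.getD q ' ' ≠ '-' then some (build o q) else none
  | none => none

def pvBuildDel (r : List Char) (nums : List Int) (i j : Nat) : List Char :=
  del_tostring (PySem.List.pyGetD nums (i : Int) 0) (PySem.List.pyGetD nums (j : Int) 0)
    (PySem.List.slice r (some (i : Int)) (some (j : Int)))

def pvBuildIns (s : List Char) (nums : List Int) (i j : Nat) : List Char :=
  ins_tostring (PySem.List.pyGetD nums (i : Int) 0)
    (PySem.List.slice s (some (i : Int)) (some (j : Int)))

-- everything emitted while processing index i: substitution, then del-close, then ins-close
def pvEmitAt (s r : List Char) (nums : List Int) (i : Nat) : List String :=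
  (if s.getD i ' ' ≠ r.getD i ' ' ∧ ¬(s.getD i ' ' = '-' ∨ s.getD i ' ' = 'n' ∨ s.getD i ' ' = 'N') ∧ r.getD i ' ' ≠ '-'
    then [String.ofList (r.getD i ' ' :: (PySem.Int.toChars (PySem.List.pyGetD nums (i : Int) 0) ++ [s.getD i ' ']))]
    else [])
  ++ ((pvSegSpec s r (pvBuildDel r nums) i).toList.map String.ofList)
  ++ ((pvSegSpec r s (pvBuildIns s nums) i).toList.map String.ofList)

lemma pvRunEnd_spec (n : Nat) (a : List Char) :
    ∀ (fuel j : Nat), n - j < fuel →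
      j ≤ pvRunEnd n a fuel j ∧ (j ≤ n → pvRunEnd n a fuel j ≤ n) ∧
      (∀ m, j ≤ m → m < pvRunEnd n a fuel j → m < n ∧ a.getD m ' ' = '-') ∧
      (pvRunEnd n a fuel j < n → a.getD (pvRunEnd n a fuel j) ' ' ≠ '-') := by
  intro fuel
  induction fuel with
  | zero => intro j h; omega
  | succ fuel ih =>
    intro j h
    by_cases hc : j < n ∧ PySem.List.pyGetD a (j : Int) ' ' = '-'
    · have hrec := ih (j+1) (by omega)
      have heq : pvRunEnd n a (fuel+1) j = pvRunEnd n a fuel (j+1) := by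
        simp [pvRunEnd, hc]
      rw [heq]
      obtain ⟨h1, h2, h3, h4⟩ := hrec
      refine ⟨by omega, fun _ => h2 (by omega), ?_, h4⟩
      intro m hm1 hm2
      rcases Nat.eq_or_lt_of_le hm1 with rfl | hlt
      · exact ⟨hc.1, by simpa using hc.2⟩
      · exact h3 m hlt hm2
    · have heq : pvRunEnd n a (fuel+1) j = j := by
        simp only [pvRunEnd, hc, if_false]
      rw [heq]
      refine ⟨le_refl _, fun h => h, fun m hm1 hm2 => by omega, fun hj hcon => ?_⟩
      exact hc ⟨hj, by simpa using hcon⟩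

lemma pvOpen_succ_none (a b : List Char) (i : Nat) (h : ¬(a.getD i ' ' = '-' ∧ b.getD i ' ' ≠ '-')) (h0 : pvOpen a b i = none) :
    pvOpen a b (i+1) = none := by
  by_cases ha : a.getD i ' ' = '-'
  · have hb : ¬ b.getD i ' ' ≠ '-' := fun hb => h ⟨ha, hb⟩
    simp only [pvOpen, ha, if_true, hb, false_and, if_false, h0]
  · simp only [pvOpen, ha, if_false]

lemma pvOpen_succ_not_gap (a b : List Char) (i : Nat) (ha : ¬ a.getD i ' ' = '-') :
    pvOpen a b (i+1) = none := by
  simp only [pvOpen, ha, if_false]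

lemma pvOpen_run (a b : List Char) (i : Nat) (hi : a.getD i ' ' = '-') (hb : b.getD i ' ' ≠ '-') (h0 : pvOpen a b i = none) :
    ∀ m, i < m → (∀ q, i < q → q < m → a.getD q ' ' = '-') → pvOpen a b m = some i := by
  intro m
  induction m with
  | zero => omega
  | succ m ihm =>
    intro him hrun
    rcases Nat.eq_or_lt_of_le (Nat.succ_le_of_lt him) with h | h
    · have : m = i := by omega
      subst this
      simp only [pvOpen]
      rw [if_pos hi, if_pos ⟨hb, h0⟩]
    · have hm : i < m := by omega
      have hma : a.getD m ' ' = '-' := hrun m hm (by omega)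
      have hsome : pvOpen a b m = some i := ihm hm (fun q h1 h2 => hrun q h1 (by omega))
      simp only [pvOpen]
      rw [if_pos hma, if_neg (by simp [hsome])]
      exact hsome

lemma pvSegments_spec (n : Nat) (a b : List Char) (build : Nat → Nat → List Char) :
    ∀ (fuel i : Nat) (segs : PySem.Dict Int (List Char)), n + 1 ≤ fuel + i →
      (i ≤ n → pvOpen a b i = none) →
      (∀ q : Nat, i ≤ q → segs.get? (q : Int) = none) →
      ∀ q : Nat, q < n →
        (pvSegments n a b build fuel i segs).get? (q : Int)
          = if q < i then segs.get? (q : Int) else pvSegSpec a b build q := by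
  intro fuel
  induction fuel with
  | zero =>
    intro i segs hf h0 hnone q hq
    simp only [pvSegments]
    rw [if_pos (by omega)]
  | succ fuel ih =>
    intro i segs hf h0 hnone q hq
    by_cases hin : i < n
    · have h0' : pvOpen a b i = none := h0 (by omega)
      by_cases hc : PySem.List.pyGetD a (i : Int) ' ' = '-' ∧ PySem.List.pyGetD b (i : Int) ' ' ≠ '-'
      · have ha : a.getD i ' ' = '-' := by simpa using hc.1
        have hb : b.getD i ' ' ≠ '-' := by simpa using hc.2
        set e := pvRunEnd n a (n+1) i with he_def
        obtain ⟨he1, he2, he3, he4⟩ := pvRunEnd_spec n a (n+1) i (by omega)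
        rw [← he_def] at he1 he2 he3 he4
        have hen : e ≤ n := he2 (by omega)
        have hei : i < e := by
          rcases Nat.eq_or_lt_of_le he1 with h | h
          · exact absurd ha (by rw [h]; exact he4 (by omega))
          · exact h
        have hfe : n + 1 ≤ fuel + (e + 1) := by omega
        have heq : pvSegments n a b build (fuel+1) i segs
            = pvSegments n a b build fuel (e+1)
                (if e < n then segs.insert (e : Int) (build i e) else segs) := by
          simp only [pvSegments]
          rw [if_pos hin, if_pos hc]
        rw [heq]
        have hrun : ∀ m, i ≤ m → m < e → a.getD m ' ' = '-' := fun m h1 h2 => (he3 m h1 h2).2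
        have hsome : ∀ m, i < m → m ≤ e → pvOpen a b m = some i := by
          intro m h1 h2
          exact pvOpen_run a b i ha hb h0' m h1 (fun q hq1 hq2 => hrun q (by omega) (by omega))
        have hnext : e + 1 ≤ n → pvOpen a b (e+1) = none := by
          intro h
          exact pvOpen_succ_not_gap a b e (he4 (by omega))
        have hnone' : ∀ p : Nat, e + 1 ≤ p →
            (if e < n then segs.insert (e : Int) (build i e) else segs).get? (p : Int) = none := by
          intro p hp
          by_cases hen' : e < n
          · rw [if_pos hen', PySem.Dict.get?_insert_of_ne _ _ (by exact_mod_cast (by omega : p ≠ e))]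
            exact hnone p (by omega)
          · rw [if_neg hen']
            exact hnone p (by omega)
        rw [ih (e+1) _ hfe hnext hnone' q hq]
        have hget : ∀ p : Nat, p ≠ e →
            (if e < n then segs.insert (e : Int) (build i e) else segs).get? (p : Int) = segs.get? (p : Int) := by
          intro p hp
          by_cases hen' : e < n
          · rw [if_pos hen', PySem.Dict.get?_insert_of_ne _ _ (by exact_mod_cast hp)]
          · rw [if_neg hen']
        by_cases hqe : q < e + 1
        · rw [if_pos hqe]
          rcases Nat.lt_or_ge q i with hqi | hqi
          · rw [if_pos hqi, hget q (by omega)]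
          · rw [if_neg (show ¬ q < i by omega)]
            rcases Nat.eq_or_lt_of_le hqi with h | h
            · -- q = i : nothing emitted at the opening index
              have hq_eq : q = i := h.symm
              rw [hget q (by omega), hnone q (by omega)]
              simp only [pvSegSpec, hq_eq, h0']
            · rcases Nat.lt_or_ge q e with hqe' | hqe'
              · -- i < q < e : inside the run
                rw [hget q (by omega), hnone q (by omega)]
                simp only [pvSegSpec, hsome q h (by omega)]
                rw [if_neg (by simpa using hrun q (by omega) hqe')]
              · -- q = e < n : the closing index
                have hq_eq : q = e := by omega
                subst hq_eq
                rw [if_pos hq, PySem.Dict.get?_insert_self]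
                simp [pvSegSpec, hsome e hei (le_refl e)]
                simpa using he4 hq
        · rw [if_neg hqe, if_neg (show ¬ q < i by omega)]
      · have heq : pvSegments n a b build (fuel+1) i segs = pvSegments n a b build fuel (i+1) segs := by
          simp only [pvSegments]
          rw [if_pos hin, if_neg hc]
        rw [heq]
        have hnext : i + 1 ≤ n → pvOpen a b (i+1) = none := by
          intro _
          refine pvOpen_succ_none a b i (fun hcon => hc ⟨by simpa using hcon.1, by simpa using hcon.2⟩) h0'
        rw [ih (i+1) segs (by omega) hnext (fun p hp => hnone p (by omega)) q hq]
        rcases Nat.lt_or_ge q i with hqi | hqi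
        · rw [if_pos (show q < i + 1 by omega), if_pos hqi]
        · rcases Nat.eq_or_lt_of_le hqi with h | h
          · have hq_eq : q = i := h.symm
            rw [if_pos (show q < i + 1 by omega), if_neg (show ¬ q < i by omega)]
            rw [hnone q (by omega)]
            simp only [pvSegSpec, hq_eq, h0']
          · rw [if_neg (show ¬ q < i + 1 by omega), if_neg (show ¬ q < i by omega)]
    · simp only [pvSegments]
      rw [if_neg hin, if_pos (show q < i by omega)]

lemma pvStepA_eq (s r : List Char) (nums : List Int) (acc : List String) (k : Nat) :
    pvStepA s r nums (acc, pvEnc (pvOpen r s k), pvEnc (pvOpen s r k)) ((k : Int), s.getD k ' ')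
      = (acc ++ pvEmitAt s r nums k, pvEnc (pvOpen r s (k+1)), pvEnc (pvOpen s r (k+1))) := by
  have hne : ∀ o : Nat, (o : Int) ≠ -1 := fun o => by omega
  simp only [pvStepA, PySem.List.pyGetD_natCast]
  simp only [List.getD_eq_getElem?_getD]
  by_cases hL : s[k]?.getD ' ' = '-'
  · -- letter is a gap: no substitution, no del-close
    by_cases hR : r[k]?.getD ' ' = '-'
    · -- both gaps: state unchanged, nothing emitted
      cases hdS : pvOpen s r k <;> cases hiS : pvOpen r s k <;>
        simp [pvEmitAt, pvSegSpec, pvOpen, pvEnc, hL, hR, hdS, hiS, hne]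
    · have hR' : ¬ '-' = r[k]?.getD ' ' := fun h => hR h.symm
      cases hdS : pvOpen s r k <;> cases hiS : pvOpen r s k <;>
        simp [pvEmitAt, pvSegSpec, pvOpen, pvEnc, pvBuildIns, hL, hR, hR', hdS, hiS, hne]
  · by_cases hR : r[k]?.getD ' ' = '-'
    · cases hdS : pvOpen s r k <;> cases hiS : pvOpen r s k <;>
        simp [pvEmitAt, pvSegSpec, pvOpen, pvEnc, pvBuildDel, hL, hR, hdS, hiS, hne]
    · cases hdS : pvOpen s r k <;> cases hiS : pvOpen r s k <;>
        simp [pvEmitAt, pvSegSpec, pvOpen, pvEnc, pvBuildDel, pvBuildIns, hL, hR, hdS, hiS, hne] <;>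
        split_ifs <;> simp

lemma pvFoldA (s r : List Char) (nums : List Int) :
    ∀ (t : List Char) (k : Nat) (acc : List String), t = s.drop k →
      ((PySem.List.enumerate t (k : Int)).foldl (pvStepA s r nums)
          (acc, pvEnc (pvOpen r s k), pvEnc (pvOpen s r k))).1
        = acc ++ (List.range' k (s.length - k)).flatMap (pvEmitAt s r nums) := by
  intro t
  induction t with
  | nil =>
    intro k acc ht
    have hk : s.length ≤ k := by
      have := congrArg List.length ht
      simp [List.length_drop] at this
      omega
    simp [PySem.List.enumerate, Nat.sub_eq_zero_of_le hk]
  | cons c t iht =>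
    intro k acc ht
    have hk : k < s.length := by
      by_contra h
      rw [List.drop_eq_nil_of_le (by omega)] at ht
      exact List.cons_ne_nil _ _ ht
    have hc : s.getD k ' ' = c := by
      have h0 : (s.drop k)[0]? = some c := by rw [← ht]; rfl
      rw [List.getElem?_drop] at h0
      simp only [Nat.add_zero] at h0
      simp [List.getD_eq_getElem?_getD, h0]
    have ht' : t = s.drop (k+1) := by
      have := congrArg List.tail ht
      simpa [List.tail_drop] using this
    have hlen : s.length - k = (s.length - (k+1)) + 1 := by omega
    rw [hlen, List.range'_succ]
    have henum : PySem.List.enumerate (c :: t) (k : Int) = ((k : Int), c) :: PySem.List.enumerate t ((k+1 : Nat) : Int) := by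
      push_cast
      simp [PySem.List.enumerate]
    rw [henum, List.foldl_cons]
    rw [show ((k : Int), c) = ((k : Int), s.getD k ' ') by rw [hc]]
    rw [pvStepA_eq s r nums acc k]
    rw [iht (k+1) (acc ++ pvEmitAt s r nums k) ht']
    simp [List.flatMap_cons, List.append_assoc]

-- A's loop is the per-index emission schedule
lemma pvA_eq (seq refseq : String) (ref_num : List Int) :
    call_mutations seq refseq ref_num
      = (List.range seq.toList.length).flatMap (pvEmitAt seq.toList refseq.toList ref_num) := by
  unfold call_mutations
  have h := pvFoldA seq.toList refseq.toList ref_num seq.toList 0 [] (by simp)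
  rw [List.range_eq_range']
  simpa [pvOpen, pvEnc] using h

-- B's second pass emits the same schedule
lemma pvB_eq (seq refseq : String) (ref_num : List Int) :
    call_mutations_alt seq refseq ref_num
      = (List.range seq.toList.length).flatMap (pvEmitAt seq.toList refseq.toList ref_num) := by
  unfold call_mutations_alt
  dsimp only
  set s := seq.toList with hs
  set r := refseq.toList with hr
  set n := s.length with hn
  have hdels := pvSegments_spec n s r (pvBuildDel r ref_num) (n+1) 0 PySem.Dict.empty
    (by omega) (fun _ => rfl) (fun q _ => rfl)
  have hinss := pvSegments_spec n r s (pvBuildIns s ref_num) (n+1) 0 PySem.Dict.empty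
    (by omega) (fun _ => rfl) (fun q _ => rfl)
  refine Eq.trans (PySem.List.foldl_congr_mem _ _ (fun acc i => acc ++ pvEmitAt s r ref_num i) _ ?_) ?_
  case refine_2 => rw [PySem.List.foldl_append_eq_flatMap]; simp
  · intro acc i hi
    have hi' : i < n := List.mem_range.mp hi
    have hd := hdels i hi'
    have hie := hinss i hi'
    rw [if_neg (by omega)] at hd hie
    simp only [PySem.List.pyGetD_natCast]
    rw [show (fun (i j : Nat) => del_tostring (ref_num.getD i 0) (ref_num.getD j 0)
          (PySem.List.slice r (some (i : Int)) (some (j : Int)))) = pvBuildDel r ref_num from by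
        funext i j; simp [pvBuildDel]]
    rw [show (fun (i j : Nat) => ins_tostring (ref_num.getD i 0)
          (PySem.List.slice s (some (i : Int)) (some (j : Int)))) = pvBuildIns s ref_num from by
        funext i j; simp [pvBuildIns]]
    rw [hd, hie]
    unfold pvEmitAt
    simp only [PySem.List.pyGetD_natCast]
    cases pvSegSpec s r (pvBuildDel r ref_num) i <;>
      cases pvSegSpec r s (pvBuildIns s ref_num) i <;>
      split_ifs <;> simp

-- ===== VERDICT (by name: the statement is the Claim_ definition above) =====
theorem call_mutations_spec : Claim_equal_call_mutations := by
  intro seq refseq ref_num _hdom _hpre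
  unfold Spec_call_mutations
  rw [pvA_eq, pvB_eq]
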